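-- pv_equiv track=rewrite | github.com/maffunity/ggwp-api-eval | detoxify-calibrate.py | voice_actor_normalize_toxicity
-- ===== SOURCE A (Python) =====
-- def voice_actor_normalize_toxicity(result, human_label=False):
--     """
--     Return whether toxic and a list of types of toxicity
--     """
--     result = result.split(',')
--     toxicity = []
--     if 'Benign' in result:
--         if human_label:
--             toxicity.append('Benign')
--         else:
--             toxicity.append('benign')
--     if 'Identity comments' in result:
--         if human_label:
--             toxicity.append('Identity comments')
--         else:
--             toxicity.append('identity_hate')
--     if 'Obscene' in result:
--         if human_label:
--             toxicity.append('Obscene')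
--         else:
--             toxicity.append('sexual_content')
--     if 'Insult' in result:
--         if human_label:
--             toxicity.append('Insult')
--         else:
--             toxicity.append('verbal abuse')
--             toxicity.append('profanity')
--     if 'Threat' in result:
--         if human_label:
--             toxicity.append('Threat')
--         else:
--             toxicity.append('violence')
--             toxicity.append('self_harm')
--     if 'Severe Toxicity' in result:
--         if human_label:
--             toxicity.append('Severe Toxicity')
--         else:
--             toxicity.append('violence')
--
--     toxicity = [ t.replace(' ','_') for t in toxicity ]
--
--     if human_label:
--         return 'Benign' not in toxicity, sorted([ t for t in toxicity if t != 'Benign' ])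
--     else:
--         return 'benign' not in toxicity, sorted([ t for t in toxicity if t != 'benign' ])
-- ===== SOURCE B (Python) =====
-- # Token-driven rewrite: dedupe the split tokens once, index each token into a dict of
-- # precomputed (human, machine) output lists (underscores pre-applied), then sort; the
-- # benign flag is read off the tokens directly. No repeated membership scans, no
-- # replace/filter passes.
-- _OUT = {
--     'Identity comments': (['Identity_comments'], ['identity_hate']),
--     'Obscene':           (['Obscene'],           ['sexual_content']),
--     'Insult':            (['Insult'],            ['verbal_abuse', 'profanity']),
--     'Threat':            (['Threat'],            ['violence', 'self_harm']),
--     'Severe Toxicity':   (['Severe_Toxicity'],   ['violence']),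
-- }
--
-- def voice_actor_normalize_toxicity(result, human_label=False):
--     tokens = dict.fromkeys(result.split(','))
--     sel = 0 if human_label else 1
--     out = [x for t in tokens for x in _OUT.get(t, ([], []))[sel]]
--     return 'Benign' not in tokens, sorted(out)
-- ===== Notes on version B (the rewrite author's own statement) =====
-- stated objective: alternative
-- what changed: Instead of scanning the split list six times with inline branches and then running replace/filter passes, B dedupes the split tokens once and indexes each token into a dict of precomputed (human, machine) output lists with underscores pre-applied, sorting the flattened result; the benign flag and filter come for free by reading the benign token off the tokens and keying the dict only on toxic labels.
import Mathlib
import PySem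

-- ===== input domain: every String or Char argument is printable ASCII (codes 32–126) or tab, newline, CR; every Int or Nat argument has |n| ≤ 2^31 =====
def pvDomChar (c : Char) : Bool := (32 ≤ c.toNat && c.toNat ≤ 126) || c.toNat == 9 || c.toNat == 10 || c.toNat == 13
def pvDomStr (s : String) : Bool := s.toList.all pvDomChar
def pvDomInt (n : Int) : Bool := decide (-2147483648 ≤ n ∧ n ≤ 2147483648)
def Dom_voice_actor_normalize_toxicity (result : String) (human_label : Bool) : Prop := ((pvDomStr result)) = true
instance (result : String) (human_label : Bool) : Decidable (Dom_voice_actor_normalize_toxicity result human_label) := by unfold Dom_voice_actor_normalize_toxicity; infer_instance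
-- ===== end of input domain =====

-- B replaces A's six membership scans / replace / filter passes by a single pass over the
-- deduplicated split tokens, indexing each token into a dict of precomputed output lists;
-- objective: simpler.


-- ===== PORT A =====
-- Literal transliteration of A: six inline membership branches, then replace/filter/sort.
def voice_actor_normalize_toxicity (result : String) (human_label : Bool) : Bool × List String :=
  let res := (PySem.Str.split? result ",").getD []  -- split? is some since sep "," ≠ ""
  let toxicity : List String := []
  let toxicity := if "Benign" ∈ res then
      (if human_label then toxicity ++ ["Benign"] else toxicity ++ ["benign"]) else toxicity
  let toxicity := if "Identity comments" ∈ res then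
      (if human_label then toxicity ++ ["Identity comments"] else toxicity ++ ["identity_hate"]) else toxicity
  let toxicity := if "Obscene" ∈ res then
      (if human_label then toxicity ++ ["Obscene"] else toxicity ++ ["sexual_content"]) else toxicity
  let toxicity := if "Insult" ∈ res then
      (if human_label then toxicity ++ ["Insult"] else toxicity ++ ["verbal abuse"] ++ ["profanity"]) else toxicity
  let toxicity := if "Threat" ∈ res then
      (if human_label then toxicity ++ ["Threat"] else toxicity ++ ["violence"] ++ ["self_harm"]) else toxicity
  let toxicity := if "Severe Toxicity" ∈ res then
      (if human_label then toxicity ++ ["Severe Toxicity"] else toxicity ++ ["violence"]) else toxicity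
  let toxicity := toxicity.map (fun t => PySem.Str.replace t " " "_")
  if human_label then
    (!(toxicity.contains "Benign"),
      PySem.List.sorted (toxicity.filter (fun t => t ≠ "Benign")) (fun t => t) false)
  else
    (!(toxicity.contains "benign"),
      PySem.List.sorted (toxicity.filter (fun t => t ≠ "benign")) (fun t => t) false)

-- ===== PORT B =====
-- Source B: dedupe the split tokens once (dict.fromkeys = PySem.List.dedup),
-- look each token up in _OUT (a dict of precomputed (human, machine) output lists),
-- flatten and sort; the benign flag is membership of 'Benign' in the tokens.
def pvOutDict : PySem.Dict String (List String × List String) :=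
  PySem.Dict.mk
    [("Identity comments", (["Identity_comments"], ["identity_hate"])),
     ("Obscene",           (["Obscene"],           ["sexual_content"])),
     ("Insult",            (["Insult"],            ["verbal_abuse", "profanity"])),
     ("Threat",            (["Threat"],            ["violence", "self_harm"])),
     ("Severe Toxicity",   (["Severe_Toxicity"],   ["violence"]))]

def voice_actor_normalize_toxicity_alt (result : String) (human_label : Bool) : Bool × List String :=
  let tokens := PySem.List.dedup ((PySem.Str.split? result ",").getD [])  -- dict.fromkeys(...); split? is some since sep "," ≠ ""
  -- '[sel]' on the pair (sel = 0 if human_label else 1) is the if-projection below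
  let out := tokens.flatMap (fun t =>
    let p := pvOutDict.getD t ([], [])
    if human_label then p.1 else p.2)
  (!(tokens.contains "Benign"), PySem.List.sorted out (fun t => t) false)

-- ===== PRECONDITION & SPEC =====
def Spec_voice_actor_normalize_toxicity (result : String) (human_label : Bool) (out : Bool × List String) : Prop := out = voice_actor_normalize_toxicity_alt result human_label
instance (result : String) (human_label : Bool) (out : Bool × List String) : Decidable (Spec_voice_actor_normalize_toxicity result human_label out) := by unfold Spec_voice_actor_normalize_toxicity; infer_instance

-- ===== CLAIM (what is proved, stated in full; the proofs are below) =====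
def Claim_equal_voice_actor_normalize_toxicity : Prop := ∀ (result : String) (human_label : Bool), Dom_voice_actor_normalize_toxicity result human_label → Spec_voice_actor_normalize_toxicity result human_label (voice_actor_normalize_toxicity result human_label)

-- ===== LEMMAS AND PROOFS =====

-- the five toxic labels, in A's branch order
def pvKeys : List String := ["Identity comments", "Obscene", "Insult", "Threat", "Severe Toxicity"]

-- the dict lookup yields the default off the five keys
theorem pv_getD_off (t : String) (ht : t ∉ pvKeys) : pvOutDict.getD t ([], []) = ([], []) := by
  simp [pvKeys] at ht
  obtain ⟨h1, h2, h3, h4, h5⟩ := ht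
  rw [pvOutDict, PySem.Dict.getD]
  rw [PySem.Dict.get?_mk_cons, PySem.Dict.get?_mk_cons, PySem.Dict.get?_mk_cons,
      PySem.Dict.get?_mk_cons, PySem.Dict.get?_mk_cons]
  simp [beq_iff_eq, Ne.symm h1, Ne.symm h2, Ne.symm h3, Ne.symm h4, Ne.symm h5, PySem.Dict.get?]

-- a flatMap whose function vanishes off p can be restricted to the p-filtered list
theorem pv_flatMap_filter {α β : Type} (f : α → List β) (p : α → Bool)
    (hf : ∀ t, p t = false → f t = []) : ∀ l : List α, l.flatMap f = (l.filter p).flatMap f := by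
  intro l
  induction l with
  | nil => rfl
  | cons x xs ih =>
    by_cases hx : p x = true
    · simp [hx, ih]
    · simp only [Bool.not_eq_true] at hx
      simp [hx, ih, hf x hx]

-- B's token-driven collection is a permutation of A's label-order collection
theorem pv_perm (f : String → List String) (hf : ∀ t, t ∉ pvKeys → f t = []) (res : List String) :
    ((PySem.List.dedup res).flatMap f).Perm ((pvKeys.filter (fun t => decide (t ∈ res))).flatMap f) := by
  have h1 : (PySem.List.dedup res).flatMap f
      = ((PySem.List.dedup res).filter (fun t => decide (t ∈ pvKeys))).flatMap f :=
    pv_flatMap_filter f _ (fun t ht => hf t (by simpa using ht)) _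
  have h2 : (pvKeys.filter (fun t => decide (t ∈ res)))
      = pvKeys.filter (fun t => decide (t ∈ PySem.List.dedup res)) := by
    apply List.filter_congr
    intro t _
    simp
  rw [h1, h2]
  refine List.Perm.flatMap_right f ?_
  refine (List.perm_ext_iff_of_nodup (List.Nodup.filter _ (PySem.List.nodup_dedup res))
    (List.Nodup.filter _ (by decide))).mpr ?_
  intro a
  simp only [List.mem_filter, decide_eq_true_eq]
  tauto

set_option maxHeartbeats 4000000 in
-- ===== VERDICT (by name: the statement is the Claim_ definition above) =====
theorem voice_actor_normalize_toxicity_spec : Claim_equal_voice_actor_normalize_toxicity := by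
  intro result human_label _
  unfold Spec_voice_actor_normalize_toxicity voice_actor_normalize_toxicity voice_actor_normalize_toxicity_alt
  generalize (PySem.Str.split? result ",").getD [] = res
  have hc : ((PySem.List.dedup res).contains "Benign") = decide ("Benign" ∈ res) := by
    simp
  cases human_label <;>
  · simp only [if_true, if_false, Bool.false_eq_true]
    rw [PySem.List.sorted_eq_sorted_of_perm _ _ (fun t => t) (fun a b h => h)
      (pv_perm _ (fun t ht => by simp [pv_getD_off t ht]) res), hc]
    by_cases h1 : "Benign" ∈ res <;>
    by_cases h2 : "Identity comments" ∈ res <;>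
    by_cases h3 : "Obscene" ∈ res <;>
    by_cases h4 : "Insult" ∈ res <;>
    by_cases h5 : "Threat" ∈ res <;>
    by_cases h6 : "Severe Toxicity" ∈ res <;>
    refine Prod.ext ?_ ?_ <;>
    simp only [pvKeys, List.filter_cons, List.filter_nil, h1, h2, h3, h4, h5, h6,
      decide_true, decide_false] <;>
    first
      | decide
      | exact PySem.List.sorted_eq_sorted_of_perm _ _ _ (fun a b h => h) (by decide)
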